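-- pv_equiv track=rewrite | github.com/VaqueroSH/workspace-github.com-VaqueroSH-DeckAnalyzer | V2/warnings.py | detect_problematic_cards
-- ===== SOURCE A (Python) =====
-- from typing import List, Dict, Optional, Callable, Set, Any
--
-- FAST_MANA_CARDS = {
--     "mana crypt", "jeweled lotus", "chrome mox", "mox diamond", "mox opal",
--     "mox amber", "lion's eye diamond", "lotus petal", "sol ring", "mana vault",
--     "ancient tomb", "grim monolith", "simian spirit guide", "elvish spirit guide"
-- }
--
-- EXTRA_TURN_CARDS = {
--     "time warp", "temporal manipulation", "time stretch", "capture of jingzhou",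
--     "temporal mastery", "walk the aeons", "expropriate", "nexus of fate",
--     "alrund's epiphany", "time walk", "timetwister", "karn's temporal sundering"
-- }
--
-- MLD_CARDS = {
--     "armageddon", "ravages of war", "jokulhaups", "obliterate", "decree of annihilation",
--     "worldfire", "sunder", "boom // bust", "limited resources", "fall of the thran",
--     "wake of destruction", "ruination", "blood moon", "magus of the moon"
-- }
--
-- STAX_CARDS = {
--     "winter orb", "static orb", "tangle wire", "smokestack", "root maze",
--     "trinisphere", "lodestone golem", "sphere of resistance", "thorn of amethyst",
--     "rule of law", "arcane laboratory", "eidolon of rhetoric", "deafening silence",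
--     "collector ouphe", "null rod", "stony silence", "torpor orb", "hushbringer",
--     "grand arbiter augustin iv", "drannith magistrate", "knowledge pool"
-- }
--
-- FREE_INTERACTION_CARDS = {
--     "force of will", "force of negation", "fierce guardianship", "deflecting swat",
--     "pact of negation", "commandeer", "disrupting shoal", "foil", "thwart"
-- }
--
-- INFINITE_COMBO_CARDS = {
--     "thoracle", "thassa's oracle", "underworld breach", "dockside extortionist",
--     "worldgorger dragon", "animate dead", "dance of the dead", "necromancy",
--     "isochron scepter", "dramatic reversal", "food chain", "squee, the immortal"
-- }
--
-- def normalize_card_name(name: str) -> str: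
--     """Normalize card name for comparison"""
--     return name.lower().strip()
--
-- def detect_problematic_cards(
--     cards: List[Dict[str, Any]]
-- ) -> Dict[str, List[str]]:
--     """
--     Detect problematic cards by name and oracle text.
--
--     Args:
--         cards: List of card dictionaries
--
--     Returns:
--         Dictionary mapping category to card names
--     """
--     results = {
--         'fast_mana': [],
--         'extra_turns': [],
--         'mld': [],
--         'stax': [],
--         'free_counters': [],
--         'infinite_combos': [],
--         'deterministic_wins': []
--     }
--
--     for card in cards:
--         name = card.get('name', '')
--         name_norm = normalize_card_name(name)
--         oracle_text = card.get('oracle_text', '').lower()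
--
--         # Check against known lists
--         if name_norm in FAST_MANA_CARDS:
--             results['fast_mana'].append(name)
--
--         if name_norm in EXTRA_TURN_CARDS:
--             results['extra_turns'].append(name)
--         elif "take an extra turn" in oracle_text or "extra turn" in oracle_text:
--             results['extra_turns'].append(name)
--
--         if name_norm in MLD_CARDS:
--             results['mld'].append(name)
--         elif "destroy all lands" in oracle_text or "destroy all land" in oracle_text:
--             results['mld'].append(name)
--
--         if name_norm in STAX_CARDS:
--             results['stax'].append(name)
--         elif any(p in oracle_text for p in ["players can't", "opponents can't", "skip your untap", "can't untap"]):
--             results['stax'].append(name)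
--
--         if name_norm in FREE_INTERACTION_CARDS:
--             results['free_counters'].append(name)
--
--         if name_norm in INFINITE_COMBO_CARDS:
--             results['infinite_combos'].append(name)
--
--         if "you win the game" in oracle_text or "each opponent loses the game" in oracle_text:
--             results['deterministic_wins'].append(name)
--
--     return results
-- ===== SOURCE B (Python) =====
-- FAST_MANA_CARDS = {
--     "mana crypt", "jeweled lotus", "chrome mox", "mox diamond", "mox opal",
--     "mox amber", "lion's eye diamond", "lotus petal", "sol ring", "mana vault",
--     "ancient tomb", "grim monolith", "simian spirit guide", "elvish spirit guide"
-- }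
--
-- EXTRA_TURN_CARDS = {
--     "time warp", "temporal manipulation", "time stretch", "capture of jingzhou",
--     "temporal mastery", "walk the aeons", "expropriate", "nexus of fate",
--     "alrund's epiphany", "time walk", "timetwister", "karn's temporal sundering"
-- }
--
-- MLD_CARDS = {
--     "armageddon", "ravages of war", "jokulhaups", "obliterate", "decree of annihilation",
--     "worldfire", "sunder", "boom // bust", "limited resources", "fall of the thran",
--     "wake of destruction", "ruination", "blood moon", "magus of the moon"
-- }
--
-- STAX_CARDS = {
--     "winter orb", "static orb", "tangle wire", "smokestack", "root maze",
--     "trinisphere", "lodestone golem", "sphere of resistance", "thorn of amethyst",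
--     "rule of law", "arcane laboratory", "eidolon of rhetoric", "deafening silence",
--     "collector ouphe", "null rod", "stony silence", "torpor orb", "hushbringer",
--     "grand arbiter augustin iv", "drannith magistrate", "knowledge pool"
-- }
--
-- FREE_INTERACTION_CARDS = {
--     "force of will", "force of negation", "fierce guardianship", "deflecting swat",
--     "pact of negation", "commandeer", "disrupting shoal", "foil", "thwart"
-- }
--
-- INFINITE_COMBO_CARDS = {
--     "thoracle", "thassa's oracle", "underworld breach", "dockside extortionist",
--     "worldgorger dragon", "animate dead", "dance of the dead", "necromancy",
--     "isochron scepter", "dramatic reversal", "food chain", "squee, the immortal"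
-- }
--
--
-- def detect_problematic_cards(cards):
--     # Category-major: normalize each card once, then build each category's
--     # list with its own filtering pass (no mutable result dict, no per-card
--     # branch chain).  Categories are independent and each preserves card
--     # order, so this matches the single-pass accumulator version.
--     prepared = [
--         (card.get('name', ''),
--          card.get('name', '').lower().strip(),
--          card.get('oracle_text', '').lower())
--         for card in cards
--     ]
--
--     def pick(pred):
--         return [name for name, norm, text in prepared if pred(norm, text)]
--
--     return {
--         'fast_mana': pick(lambda n, t: n in FAST_MANA_CARDS),
--         'extra_turns': pick(lambda n, t: n in EXTRA_TURN_CARDS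
--                             or "take an extra turn" in t or "extra turn" in t),
--         'mld': pick(lambda n, t: n in MLD_CARDS
--                     or "destroy all lands" in t or "destroy all land" in t),
--         'stax': pick(lambda n, t: n in STAX_CARDS
--                      or any(p in t for p in ("players can't", "opponents can't",
--                                              "skip your untap", "can't untap"))),
--         'free_counters': pick(lambda n, t: n in FREE_INTERACTION_CARDS),
--         'infinite_combos': pick(lambda n, t: n in INFINITE_COMBO_CARDS),
--         'deterministic_wins': pick(lambda n, t: "you win the game" in t
--                                    or "each opponent loses the game" in t),
--     }
-- ===== Notes on version B (the rewrite author's own statement) =====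
-- stated objective: alternative
-- what changed: Replaces the single card-major pass mutating a results dict through seven if/elif branch blocks with a category-major decomposition: cards are normalized once into (name, norm, text) tuples, then each of the seven result lists is built by its own independent filtering pass, with no mutable dict accumulator.
import Mathlib
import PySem

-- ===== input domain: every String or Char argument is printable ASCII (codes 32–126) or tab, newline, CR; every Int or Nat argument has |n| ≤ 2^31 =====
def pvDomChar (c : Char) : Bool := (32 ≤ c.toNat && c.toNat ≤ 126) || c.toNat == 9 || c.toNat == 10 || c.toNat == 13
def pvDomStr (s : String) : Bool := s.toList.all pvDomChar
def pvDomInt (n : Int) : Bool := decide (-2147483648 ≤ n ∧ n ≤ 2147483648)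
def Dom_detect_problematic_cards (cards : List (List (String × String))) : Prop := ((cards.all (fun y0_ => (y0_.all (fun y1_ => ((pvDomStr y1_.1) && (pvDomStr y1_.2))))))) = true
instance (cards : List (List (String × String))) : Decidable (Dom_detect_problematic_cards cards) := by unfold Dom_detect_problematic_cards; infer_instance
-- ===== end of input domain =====

-- B rebuilds the result category-major: cards normalized once, then one independent filtering pass per category (alternative decomposition; same cost); A's port keeps the card-major dict-accumulator loop.


-- ===== PORT A =====
def pvFastMana : PySem.Set String := PySem.Set.ofList
  ["mana crypt", "jeweled lotus", "chrome mox", "mox diamond", "mox opal",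
   "mox amber", "lion's eye diamond", "lotus petal", "sol ring", "mana vault",
   "ancient tomb", "grim monolith", "simian spirit guide", "elvish spirit guide"]

def pvExtraTurn : PySem.Set String := PySem.Set.ofList
  ["time warp", "temporal manipulation", "time stretch", "capture of jingzhou",
   "temporal mastery", "walk the aeons", "expropriate", "nexus of fate",
   "alrund's epiphany", "time walk", "timetwister", "karn's temporal sundering"]

def pvMld : PySem.Set String := PySem.Set.ofList
  ["armageddon", "ravages of war", "jokulhaups", "obliterate", "decree of annihilation",
   "worldfire", "sunder", "boom // bust", "limited resources", "fall of the thran",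
   "wake of destruction", "ruination", "blood moon", "magus of the moon"]

def pvStax : PySem.Set String := PySem.Set.ofList
  ["winter orb", "static orb", "tangle wire", "smokestack", "root maze",
   "trinisphere", "lodestone golem", "sphere of resistance", "thorn of amethyst",
   "rule of law", "arcane laboratory", "eidolon of rhetoric", "deafening silence",
   "collector ouphe", "null rod", "stony silence", "torpor orb", "hushbringer",
   "grand arbiter augustin iv", "drannith magistrate", "knowledge pool"]

def pvFreeInteraction : PySem.Set String := PySem.Set.ofList
  ["force of will", "force of negation", "fierce guardianship", "deflecting swat",
   "pact of negation", "commandeer", "disrupting shoal", "foil", "thwart"]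

def pvInfiniteCombo : PySem.Set String := PySem.Set.ofList
  ["thoracle", "thassa's oracle", "underworld breach", "dockside extortionist",
   "worldgorger dragon", "animate dead", "dance of the dead", "necromancy",
   "isochron scepter", "dramatic reversal", "food chain", "squee, the immortal"]

def normalize_card_name (name : String) : String := PySem.Str.strip (PySem.Str.lower name)

-- A's loop body: the seven hard-coded if/elif blocks (results['k'].append(name) = modify "k" [] (· ++ [name]))
def pvStepA (results : PySem.Dict String (List String)) (card : List (String × String)) :
    PySem.Dict String (List String) :=
  let name := (card.lookup "name").getD ""
  let name_norm := normalize_card_name name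
  let oracle_text := PySem.Str.lower ((card.lookup "oracle_text").getD "")
  let r := if pvFastMana.contains name_norm then results.modify "fast_mana" [] (· ++ [name]) else results
  let r := if pvExtraTurn.contains name_norm then r.modify "extra_turns" [] (· ++ [name])
           else if PySem.Str.isIn "take an extra turn" oracle_text || PySem.Str.isIn "extra turn" oracle_text then
             r.modify "extra_turns" [] (· ++ [name]) else r
  let r := if pvMld.contains name_norm then r.modify "mld" [] (· ++ [name])
           else if PySem.Str.isIn "destroy all lands" oracle_text || PySem.Str.isIn "destroy all land" oracle_text then
             r.modify "mld" [] (· ++ [name]) else r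
  let r := if pvStax.contains name_norm then r.modify "stax" [] (· ++ [name])
           else if ["players can't", "opponents can't", "skip your untap", "can't untap"].any
               (fun p => PySem.Str.isIn p oracle_text) then
             r.modify "stax" [] (· ++ [name]) else r
  let r := if pvFreeInteraction.contains name_norm then r.modify "free_counters" [] (· ++ [name]) else r
  let r := if pvInfiniteCombo.contains name_norm then r.modify "infinite_combos" [] (· ++ [name]) else r
  let r := if PySem.Str.isIn "you win the game" oracle_text || PySem.Str.isIn "each opponent loses the game" oracle_text then
             r.modify "deterministic_wins" [] (· ++ [name]) else r
  r

def detect_problematic_cards (cards : List (List (String × String))) : List (String × List String) :=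
  let results : PySem.Dict String (List String) :=
    ((((((PySem.Dict.empty.insert "fast_mana" []).insert "extra_turns" []).insert "mld" []).insert
        "stax" []).insert "free_counters" []).insert "infinite_combos" []).insert "deterministic_wins" []
  (cards.foldl pvStepA results).items

-- ===== PORT B =====
-- Source B: prepare each card once as (name, normalized name, lowered oracle text)
def pvPrep (card : List (String × String)) : String × String × String :=
  ((card.lookup "name").getD "",
   PySem.Str.strip (PySem.Str.lower ((card.lookup "name").getD "")),
   PySem.Str.lower ((card.lookup "oracle_text").getD ""))

-- Source B's pick: names of the prepared cards whose (norm, text) satisfy pred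
def pvPick (prepared : List (String × String × String)) (pred : String → String → Bool) : List String :=
  (prepared.filter (fun t => pred t.2.1 t.2.2)).map (·.1)

def detect_problematic_cards_alt (cards : List (List (String × String))) : List (String × List String) :=
  let prepared := cards.map pvPrep
  [("fast_mana", pvPick prepared (fun n _ => pvFastMana.contains n)),
   ("extra_turns", pvPick prepared (fun n t => pvExtraTurn.contains n
      || PySem.Str.isIn "take an extra turn" t || PySem.Str.isIn "extra turn" t)),
   ("mld", pvPick prepared (fun n t => pvMld.contains n
      || PySem.Str.isIn "destroy all lands" t || PySem.Str.isIn "destroy all land" t)),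
   ("stax", pvPick prepared (fun n t => pvStax.contains n
      || ["players can't", "opponents can't", "skip your untap", "can't untap"].any
           (fun p => PySem.Str.isIn p t))),
   ("free_counters", pvPick prepared (fun n _ => pvFreeInteraction.contains n)),
   ("infinite_combos", pvPick prepared (fun n _ => pvInfiniteCombo.contains n)),
   ("deterministic_wins", pvPick prepared (fun _ t => PySem.Str.isIn "you win the game" t
      || PySem.Str.isIn "each opponent loses the game" t))]

-- ===== PRECONDITION & SPEC =====
def Spec_detect_problematic_cards (cards : List (List (String × String))) (out : List (String × List String)) : Prop := out = detect_problematic_cards_alt cards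
instance (cards : List (List (String × String))) (out : List (String × List String)) : Decidable (Spec_detect_problematic_cards cards out) := by unfold Spec_detect_problematic_cards; infer_instance

-- ===== CLAIM =====
def Claim_equal_detect_problematic_cards : Prop := ∀ (cards : List (List (String × String))), Dom_detect_problematic_cards cards → Spec_detect_problematic_cards cards (detect_problematic_cards cards)

-- ===== LEMMAS AND PROOFS =====

-- A's result dict always has exactly these seven keys in this order
def pvMk7 (l1 l2 l3 l4 l5 l6 l7 : List String) : PySem.Dict String (List String) :=
  PySem.Dict.mk [("fast_mana", l1), ("extra_turns", l2), ("mld", l3), ("stax", l4),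
                 ("free_counters", l5), ("infinite_combos", l6), ("deterministic_wins", l7)]

-- the seven per-card membership tests, phrased on the prepared tuple (as B uses them)
def pvP1 (n : String) (_ : String) : Bool := pvFastMana.contains n
def pvP2 (n t : String) : Bool := pvExtraTurn.contains n
  || PySem.Str.isIn "take an extra turn" t || PySem.Str.isIn "extra turn" t
def pvP3 (n t : String) : Bool := pvMld.contains n
  || PySem.Str.isIn "destroy all lands" t || PySem.Str.isIn "destroy all land" t
def pvP4 (n t : String) : Bool := pvStax.contains n
  || ["players can't", "opponents can't", "skip your untap", "can't untap"].any
       (fun p => PySem.Str.isIn p t)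
def pvP5 (n : String) (_ : String) : Bool := pvFreeInteraction.contains n
def pvP6 (n : String) (_ : String) : Bool := pvInfiniteCombo.contains n
def pvP7 (_ t : String) : Bool := PySem.Str.isIn "you win the game" t
  || PySem.Str.isIn "each opponent loses the game" t

-- what card c contributes to category i
def pvAdd (p : String → String → Bool) (c : List (String × String)) : List String :=
  if p (pvPrep c).2.1 (pvPrep c).2.2 then [(pvPrep c).1] else []

-- lifting each of A's conditional category blocks over the literal seven-key state
theorem pvIf1 (c : Prop) [Decidable c] (l1 l2 l3 l4 l5 l6 l7 : List String) (f : List String → List String) :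
    (if c then (pvMk7 l1 l2 l3 l4 l5 l6 l7).modify "fast_mana" [] f else pvMk7 l1 l2 l3 l4 l5 l6 l7)
    = pvMk7 (if c then f l1 else l1) l2 l3 l4 l5 l6 l7 := by
  split_ifs <;> rfl
theorem pvIf2 (a b : Prop) [Decidable a] [Decidable b] (l1 l2 l3 l4 l5 l6 l7 : List String) (f : List String → List String) :
    (if a then (pvMk7 l1 l2 l3 l4 l5 l6 l7).modify "extra_turns" [] f
     else if b then (pvMk7 l1 l2 l3 l4 l5 l6 l7).modify "extra_turns" [] f else pvMk7 l1 l2 l3 l4 l5 l6 l7)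
    = pvMk7 l1 (if a ∨ b then f l2 else l2) l3 l4 l5 l6 l7 := by
  split_ifs <;> first | rfl | tauto
theorem pvIf3 (a b : Prop) [Decidable a] [Decidable b] (l1 l2 l3 l4 l5 l6 l7 : List String) (f : List String → List String) :
    (if a then (pvMk7 l1 l2 l3 l4 l5 l6 l7).modify "mld" [] f
     else if b then (pvMk7 l1 l2 l3 l4 l5 l6 l7).modify "mld" [] f else pvMk7 l1 l2 l3 l4 l5 l6 l7)
    = pvMk7 l1 l2 (if a ∨ b then f l3 else l3) l4 l5 l6 l7 := by
  split_ifs <;> first | rfl | tauto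
theorem pvIf4 (a b : Prop) [Decidable a] [Decidable b] (l1 l2 l3 l4 l5 l6 l7 : List String) (f : List String → List String) :
    (if a then (pvMk7 l1 l2 l3 l4 l5 l6 l7).modify "stax" [] f
     else if b then (pvMk7 l1 l2 l3 l4 l5 l6 l7).modify "stax" [] f else pvMk7 l1 l2 l3 l4 l5 l6 l7)
    = pvMk7 l1 l2 l3 (if a ∨ b then f l4 else l4) l5 l6 l7 := by
  split_ifs <;> first | rfl | tauto
theorem pvIf5 (c : Prop) [Decidable c] (l1 l2 l3 l4 l5 l6 l7 : List String) (f : List String → List String) :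
    (if c then (pvMk7 l1 l2 l3 l4 l5 l6 l7).modify "free_counters" [] f else pvMk7 l1 l2 l3 l4 l5 l6 l7)
    = pvMk7 l1 l2 l3 l4 (if c then f l5 else l5) l6 l7 := by
  split_ifs <;> rfl
theorem pvIf6 (c : Prop) [Decidable c] (l1 l2 l3 l4 l5 l6 l7 : List String) (f : List String → List String) :
    (if c then (pvMk7 l1 l2 l3 l4 l5 l6 l7).modify "infinite_combos" [] f else pvMk7 l1 l2 l3 l4 l5 l6 l7)
    = pvMk7 l1 l2 l3 l4 l5 (if c then f l6 else l6) l7 := by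
  split_ifs <;> rfl
theorem pvIf7 (c : Prop) [Decidable c] (l1 l2 l3 l4 l5 l6 l7 : List String) (f : List String → List String) :
    (if c then (pvMk7 l1 l2 l3 l4 l5 l6 l7).modify "deterministic_wins" [] f else pvMk7 l1 l2 l3 l4 l5 l6 l7)
    = pvMk7 l1 l2 l3 l4 l5 l6 (if c then f l7 else l7) := by
  split_ifs <;> rfl

-- (if c then l ++ [x] else l) pulled apart into l ++ (card's contribution)
theorem pvAppIf (c : Prop) [Decidable c] (l : List String) (x : String) :
    (if c then l ++ [x] else l) = l ++ (if c then [x] else []) := by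
  split_ifs <;> simp

-- one A-step on the seven-key state appends each card's contributions
theorem pvStepA_mk7 (l1 l2 l3 l4 l5 l6 l7 : List String) (c : List (String × String)) :
    pvStepA (pvMk7 l1 l2 l3 l4 l5 l6 l7) c =
    pvMk7 (l1 ++ pvAdd pvP1 c) (l2 ++ pvAdd pvP2 c) (l3 ++ pvAdd pvP3 c) (l4 ++ pvAdd pvP4 c)
          (l5 ++ pvAdd pvP5 c) (l6 ++ pvAdd pvP6 c) (l7 ++ pvAdd pvP7 c) := by
  simp only [pvStepA, pvIf1, pvIf2, pvIf3, pvIf4, pvIf5, pvIf6, pvIf7, pvAppIf]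
  simp only [pvAdd, pvP1, pvP2, pvP3, pvP4, pvP5, pvP6, pvP7, pvPrep, normalize_card_name]
  simp [Bool.or_eq_true, or_assoc]

theorem pvPick_cons (t : String × String × String) (ps : List (String × String × String))
    (p : String → String → Bool) :
    pvPick (t :: ps) p = (if p t.2.1 t.2.2 then [t.1] else []) ++ pvPick ps p := by
  simp only [pvPick, List.filter_cons]
  split_ifs with h <;> simp_all

-- the whole A-fold, characterised category by category
theorem pvFoldA (cards : List (List (String × String))) (l1 l2 l3 l4 l5 l6 l7 : List String) :
    cards.foldl pvStepA (pvMk7 l1 l2 l3 l4 l5 l6 l7) =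
    pvMk7 (l1 ++ pvPick (cards.map pvPrep) pvP1) (l2 ++ pvPick (cards.map pvPrep) pvP2)
          (l3 ++ pvPick (cards.map pvPrep) pvP3) (l4 ++ pvPick (cards.map pvPrep) pvP4)
          (l5 ++ pvPick (cards.map pvPrep) pvP5) (l6 ++ pvPick (cards.map pvPrep) pvP6)
          (l7 ++ pvPick (cards.map pvPrep) pvP7) := by
  induction cards generalizing l1 l2 l3 l4 l5 l6 l7 with
  | nil => simp [pvPick]
  | cons c cs ih =>
      rw [List.foldl_cons, pvStepA_mk7, ih]
      simp [pvPick_cons, pvAdd, List.append_assoc]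

-- ===== VERDICT =====
theorem detect_problematic_cards_spec : Claim_equal_detect_problematic_cards := by
  intro cards _
  show (cards.foldl pvStepA (pvMk7 [] [] [] [] [] [] [])).items = detect_problematic_cards_alt cards
  rw [pvFoldA]
  rfl
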